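-- pv_equiv track=rewrite | github.com/sharathbcgowda1995/PythonTechStack | Python_programming/reverse_without_space.py | reverse_word_space
-- ===== SOURCE A (Python) =====
-- def reverse_word_space(word_string):
--     word = list(word_string)
--     start = 0
--     end = len(word)-1
--     while(start<end):
--         if word[start]==' ':
--             start+=1
--         elif word[end]==' ':
--             end-=1
--         else :
--             word[start],word[end]=word[end],word[start]
--             start+=1
--             end-=1
--
--     return ''.join(word)
-- ===== SOURCE B (Python) =====
-- def reverse_word_space(word_string):
--     rev = [c for c in word_string if c != ' '][::-1]
--     it = iter(rev)
--     return ''.join(' ' if c == ' ' else next(it) for c in word_string)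
-- ===== Notes on version B (the rewrite author's own statement) =====
-- stated objective: idiomatic
-- what changed: Replaces the in-place two-pointer swap loop over a mutable char list by collecting the non-space characters, reversing them, and refilling them left-to-right at the non-space positions.
import Mathlib
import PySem

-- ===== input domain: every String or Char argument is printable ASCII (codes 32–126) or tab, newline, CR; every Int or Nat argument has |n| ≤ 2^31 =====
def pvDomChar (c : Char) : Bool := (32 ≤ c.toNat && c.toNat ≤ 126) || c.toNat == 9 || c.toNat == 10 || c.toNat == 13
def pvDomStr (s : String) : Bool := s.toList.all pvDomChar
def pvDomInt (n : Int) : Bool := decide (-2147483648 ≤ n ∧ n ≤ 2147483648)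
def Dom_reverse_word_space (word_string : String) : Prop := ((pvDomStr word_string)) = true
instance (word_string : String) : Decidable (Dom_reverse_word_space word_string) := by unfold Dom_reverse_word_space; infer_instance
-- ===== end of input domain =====

-- B collects the non-space characters, reverses them, and refills them at the
-- non-space positions; A swaps in place with two pointers. Same return value, proved below.

-- ===== PORT A =====
-- the while loop of A: state (word, start, end); indices stay in range, getD's default is never used
def loopA (word : List Char) (s e : Nat) : List Char :=
  if h : s < e then
    if word.getD s ' ' = ' ' then loopA word (s + 1) e
    else if word.getD e ' ' = ' ' then loopA word s (e - 1)
    else loopA ((word.set s (word.getD e ' ')).set e (word.getD s ' ')) (s + 1) (e - 1)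
  else word
termination_by e - s
decreasing_by all_goals omega

def reverse_word_space (word_string : String) : String :=
  String.mk (loopA word_string.toList 0 (word_string.toList.length - 1))

-- ===== PORT B =====
-- ''.join(' ' if c==' ' else next(it) for c in word_string); the rs=[] non-space case
-- corresponds to an exhausted iterator, unreachable because rev holds every non-space char
def refill : List Char → List Char → List Char
  | [], _ => []
  | c :: cs, rs =>
    if c = ' ' then ' ' :: refill cs rs
    else match rs with
      | r :: rs' => r :: refill cs rs'
      | [] => c :: refill cs []

def reverse_word_space_alt (word_string : String) : String :=
  String.mk (refill word_string.toList ((word_string.toList.filter (· != ' ')).reverse))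

-- ===== PRECONDITION & SPEC =====
def Spec_reverse_word_space (word_string : String) (out : String) : Prop := out = reverse_word_space_alt word_string
instance (word_string : String) (out : String) : Decidable (Spec_reverse_word_space word_string out) := by unfold Spec_reverse_word_space; infer_instance

-- ===== CLAIM (what is proved, stated in full; the proofs are below) =====
def Claim_equal_reverse_word_space : Prop := ∀ (word_string : String), Dom_reverse_word_space word_string → Spec_reverse_word_space word_string (reverse_word_space word_string)

-- ===== LEMMAS AND PROOFS =====

-- what B computes on a segment
def g (seg : List Char) : List Char := refill seg ((seg.filter (· != ' ')).reverse)

theorem g_nil : g [] = [] := rfl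

theorem g_single (c : Char) : g [c] = [c] := by
  by_cases h : c = ' ' <;> simp [g, refill, h]

theorem g_cons_space (t : List Char) : g (' ' :: t) = ' ' :: g t := by
  simp [g, refill]

theorem refill_append_space (t rs : List Char) :
    refill (t ++ [' ']) rs = refill t rs ++ [' '] := by
  induction t generalizing rs with
  | nil => simp [refill]
  | cons c cs ih =>
    by_cases h : c = ' '
    · simp [refill, h, ih]
    · cases rs with
      | nil => simp [refill, h, ih]
      | cons r rs' => simp [refill, h, ih]

theorem g_append_space (t : List Char) : g (t ++ [' ']) = g t ++ [' '] := by
  simp [g, refill_append_space]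

theorem refill_append_nonspace (mid rs : List Char) (c d : Char) (hd : d ≠ ' ')
    (hlen : rs.length = (mid.filter (· != ' ')).length) :
    refill (mid ++ [d]) (rs ++ [c]) = refill mid rs ++ [c] := by
  induction mid generalizing rs with
  | nil =>
    have : rs = [] := by simpa using List.length_eq_zero_iff.mp (by simpa using hlen)
    subst this; simp [refill, hd]
  | cons m ms ih =>
    by_cases h : m = ' '
    · simp only [List.cons_append, refill, if_pos h]
      rw [ih rs (by simpa [h] using hlen)]
    · have : rs.length = (ms.filter (· != ' ')).length + 1 := by simpa [h] using hlen
      cases rs with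
      | nil => simp at this
      | cons r rs' =>
        simp only [List.cons_append, refill, if_neg h]
        rw [ih rs' (by simpa using this)]

theorem g_swap (mid : List Char) (c d : Char) (hc : c ≠ ' ') (hd : d ≠ ' ') :
    g (c :: mid ++ [d]) = d :: g mid ++ [c] := by
  have hf : (c :: mid ++ [d]).filter (· != ' ') = c :: mid.filter (· != ' ') ++ [d] := by
    simp [hc, hd]
  simp only [g, hf]
  have hr : (c :: mid.filter (· != ' ') ++ [d]).reverse
      = d :: ((mid.filter (· != ' ')).reverse ++ [c]) := by simp
  rw [hr]
  simp only [List.cons_append, refill, if_neg hc]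
  rw [refill_append_nonspace (mid := mid)
    (rs := (mid.filter (· != ' ')).reverse) c d hd (by simp)]

theorem loopA_main (n : Nat) (seg a b : List Char) (hn : seg.length = n) :
    loopA (a ++ seg ++ b) a.length (a.length + seg.length - 1) = a ++ g seg ++ b := by
  induction n using Nat.strong_induction_on generalizing seg a b with
  | _ n ih =>
  match seg with
  | [] =>
    rw [loopA]
    simp [g_nil]
  | [c] =>
    rw [loopA]
    simp [g_single]
  | c :: d :: t =>
    obtain ⟨m, x, hmx⟩ : ∃ m x, d :: t = m ++ [x] :=
      ⟨(d :: t).dropLast, (d :: t).getLast (by simp),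
        (List.dropLast_concat_getLast (by simp)).symm⟩
    rw [hmx, show c :: (m ++ [x]) = (c :: m) ++ [x] from rfl]
    have hgs : (a ++ ((c :: m) ++ [x]) ++ b).getD a.length ' ' = c := by
      rw [List.getD_eq_getElem?_getD, List.append_assoc,
        List.getElem?_append_right (by omega)]
      simp
    have hge : (a ++ ((c :: m) ++ [x]) ++ b).getD (a.length + m.length + 1) ' ' = x := by
      rw [List.getD_eq_getElem?_getD, List.append_assoc,
        List.getElem?_append_right (l₁ := a) (by omega)]
      have h' : a.length + m.length + 1 - a.length = m.length + 1 := by omega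
      rw [h', List.getElem?_append_left (by simp),
        List.getElem?_append_right (by simp)]
      simp
    have he : a.length + ((c :: m) ++ [x]).length - 1 = a.length + m.length + 1 := by
      simp; omega
    have hnm : m.length + 2 = n := by
      have := congrArg List.length hmx
      simp at this hn; omega
    rw [he, loopA, dif_pos (by omega), hgs, hge]
    by_cases hc : c = ' '
    · rw [if_pos hc, hc]
      have h1 : a ++ ((' ' :: m) ++ [x]) ++ b = (a ++ [' ']) ++ (m ++ [x]) ++ b := by
        simp
      have h2 : a.length + 1 = (a ++ [' ']).length := by simp
      have h3 : a.length + m.length + 1 = (a ++ [' ']).length + (m ++ [x]).length - 1 := by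
        simp; omega
      rw [h1, h2, h3, ih (m.length + 1) (by omega) (m ++ [x]) (a ++ [' ']) b (by simp)]
      rw [show (' ' :: m) ++ [x] = ' ' :: (m ++ [x]) from rfl, g_cons_space]
      simp
    · rw [if_neg hc]
      by_cases hx : x = ' '
      · rw [if_pos hx, hx]
        have h1 : a ++ ((c :: m) ++ [' ']) ++ b = a ++ (c :: m) ++ ([' '] ++ b) := by
          simp
        have h3 : a.length + m.length + 1 - 1 = a.length + (c :: m).length - 1 := by
          simp
        rw [h1, h3, ih (m.length + 1) (by omega) (c :: m) a ([' '] ++ b) (by simp)]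
        rw [g_append_space (c :: m)]
        simp
      · rw [if_neg hx]
        have hset : ((a ++ ((c :: m) ++ [x]) ++ b).set a.length x).set
            (a.length + m.length + 1) c = (a ++ [x]) ++ m ++ ([c] ++ b) := by
          rw [show a ++ ((c :: m) ++ [x]) ++ b = a ++ (c :: (m ++ ([x] ++ b))) from by
            simp]
          rw [List.set_append_right _ _ (le_refl _), Nat.sub_self]
          rw [show (c :: (m ++ ([x] ++ b))).set 0 x = x :: (m ++ ([x] ++ b)) from rfl]
          rw [List.set_append_right _ _ (by omega),
            show a.length + m.length + 1 - a.length = m.length + 1 from by omega]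
          rw [show (x :: (m ++ ([x] ++ b))).set (m.length + 1) c
              = x :: ((m ++ ([x] ++ b)).set m.length c) from rfl]
          rw [List.set_append_right _ _ (le_refl _), Nat.sub_self]
          simp
        rw [hset]
        have h2 : a.length + 1 = (a ++ [x]).length := by simp
        have h3 : a.length + m.length + 1 - 1 = (a ++ [x]).length + m.length - 1 := by
          simp
        rw [h2, h3, ih m.length (by omega) m (a ++ [x]) ([c] ++ b) rfl]
        rw [g_swap m c x hc hx]
        simp

theorem reverse_word_space_spec : Claim_equal_reverse_word_space := by
  intro w _
  show _ = _
  unfold reverse_word_space reverse_word_space_alt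
  have h := loopA_main w.toList.length w.toList [] [] rfl
  simp only [List.nil_append, List.append_nil, List.length_nil, Nat.zero_add, g] at h
  rw [h]
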